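-- pv_equiv track=rewrite | github.com/MrHamdulay/csc3-capstone | examples/data/Assignment_4/mggdac001/ndom.py | ndom_multiply
-- ===== SOURCE A (Python) =====
-- def ndom_multiply (a, b):
--     x = len(str(a))
--     a0 = 1
--     b0 = 0
--     for i in range(x):
--         a1 = int(str(a)[i]) * 6**(x-a0)
--         a0 = a0+1
--         b0 = b0+a1
--
--     x = len(str(b))
--     a00 = 1
--     b00 = 0
--     for i in range(x):
--         a1 = int(str(b)[i]) * 6**(x-a00)
--         a00 = a00+1
--         b00 = b00+a1
--     return b0*b00
-- ===== SOURCE B (Python) =====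
-- def ndom_multiply(a, b):
--     va = 0
--     for c in str(a):
--         va = va * 6 + int(c)
--     vb = 0
--     for c in str(b):
--         vb = vb * 6 + int(c)
--     return va * vb
-- ===== Notes on version B (the rewrite author's own statement) =====
-- stated objective: simpler
-- what changed: Each operand is converted with Horner's method (acc = acc*6 + digit over the characters) instead of A's indexed power-sum with a position counter and 6**(x-k) recomputed per digit.
import Mathlib
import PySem

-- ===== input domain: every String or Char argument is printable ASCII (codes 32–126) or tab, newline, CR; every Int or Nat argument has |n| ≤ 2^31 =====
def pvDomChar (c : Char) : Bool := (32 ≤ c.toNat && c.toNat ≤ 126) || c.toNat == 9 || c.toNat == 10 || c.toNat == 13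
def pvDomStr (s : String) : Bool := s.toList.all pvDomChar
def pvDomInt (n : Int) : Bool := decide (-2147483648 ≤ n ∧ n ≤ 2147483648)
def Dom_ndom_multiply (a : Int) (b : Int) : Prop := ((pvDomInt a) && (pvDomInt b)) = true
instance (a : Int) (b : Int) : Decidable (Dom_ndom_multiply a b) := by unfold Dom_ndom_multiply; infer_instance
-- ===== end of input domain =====

-- B converts each operand with Horner's method (acc = acc*6 + digit) instead of A's
-- position-counter power-sum with 6**(x-k) per digit; return-value equivalence, no side effects.

-- int(c) for a single character c: Python raises ValueError on a non-digit; under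
-- Pre_ (a,b ≥ 0) every character of str(n) is a digit, so the 'none' case never occurs
-- and the getD default is never used.
def pvDigit (c : Char) : Int := (PySem.Int.ofChars? [c]).getD 0

-- ===== PORT A =====
-- str(a)[i] is always in range (i ∈ range(len(str(a)))), so pyGetD's default is never used.
def ndom_multiply (a : Int) (b : Int) : Int :=
  let sa := PySem.Int.toChars a
  let x : Int := (sa.length : Int)
  let st := (PySem.List.pyRange 0 x 1).foldl
    (fun (st : Int × Int) i =>
      let a1 := pvDigit (PySem.List.pyGetD sa i ' ') * 6 ^ (x - st.1).toNat
      (st.1 + 1, st.2 + a1)) (1, 0)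
  let sb := PySem.Int.toChars b
  let x2 : Int := (sb.length : Int)
  let st2 := (PySem.List.pyRange 0 x2 1).foldl
    (fun (st : Int × Int) i =>
      let a1 := pvDigit (PySem.List.pyGetD sb i ' ') * 6 ^ (x2 - st.1).toNat
      (st.1 + 1, st.2 + a1)) (1, 0)
  st.2 * st2.2

-- ===== PORT B =====
def ndom_multiply_alt (a : Int) (b : Int) : Int :=
  let va := (PySem.Int.toChars a).foldl (fun acc c => acc * 6 + pvDigit c) 0
  let vb := (PySem.Int.toChars b).foldl (fun acc c => acc * 6 + pvDigit c) 0
  va * vb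

-- ===== PRECONDITION & SPEC =====
-- str(n) of a negative int starts with '-', on which int('-') raises ValueError in A (and in B);
-- Pre_ admits exactly the inputs on which Python A returns.
def Pre_ndom_multiply (a : Int) (b : Int) : Prop := 0 ≤ a ∧ 0 ≤ b
instance (a : Int) (b : Int) : Decidable (Pre_ndom_multiply a b) := by unfold Pre_ndom_multiply; infer_instance
def pvWitness_ndom_multiply : Int × Int := (15, 204)

def Spec_ndom_multiply (a : Int) (b : Int) (out : Int) : Prop := out = ndom_multiply_alt a b
instance (a : Int) (b : Int) (out : Int) : Decidable (Spec_ndom_multiply a b out) := by unfold Spec_ndom_multiply; infer_instance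

-- ===== CLAIM (what is proved, stated in full; the proofs are below) =====
def Claim_equal_ndom_multiply : Prop := ∀ (a : Int) (b : Int), Dom_ndom_multiply a b → Pre_ndom_multiply a b → Spec_ndom_multiply a b (ndom_multiply a b)

-- ===== LEMMAS AND PROOFS =====

-- Horner fold shift: starting from acc is acc·6^len plus starting from 0.
theorem pvHorner_shift (l : List Char) (acc : Int) :
    l.foldl (fun acc c => acc * 6 + pvDigit c) acc
      = acc * 6 ^ l.length + l.foldl (fun acc c => acc * 6 + pvDigit c) 0 := by
  induction l generalizing acc with
  | nil => simp
  | cons c t ih =>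
    simp only [List.foldl_cons, List.length_cons]
    rw [ih (acc * 6 + pvDigit c), ih (0 * 6 + pvDigit c)]
    ring

-- A's indexed power-sum fold equals the Horner value, given the counter invariant x - k = len l.
theorem pvPowfold (x : Int) (l : List Char) (k s : Int) (h : x - k + 1 = l.length) :
    (l.foldl (fun (st : Int × Int) c =>
        (st.1 + 1, st.2 + pvDigit c * 6 ^ (x - st.1).toNat)) (k, s)).2
      = s + l.foldl (fun acc c => acc * 6 + pvDigit c) 0 := by
  induction l generalizing k s with
  | nil => simp
  | cons c t ih =>
    simp only [List.foldl_cons]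
    have hxk : x - k = (t.length : Int) := by
      simp only [List.length_cons] at h; push_cast at h ⊢; omega
    have htoNat : (x - k).toNat = t.length := by omega
    rw [ih (k + 1) (s + pvDigit c * 6 ^ (x - k).toNat)
        (by simp only [List.length_cons] at h; push_cast at h ⊢; omega)]
    rw [pvHorner_shift t (0 * 6 + pvDigit c), htoNat]
    ring

theorem pvOperand (n : Int) :
    ((PySem.List.pyRange 0 ((PySem.Int.toChars n).length : Int) 1).foldl
      (fun (st : Int × Int) i =>
        (st.1 + 1, st.2 + pvDigit (PySem.List.pyGetD (PySem.Int.toChars n) i ' ')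
            * 6 ^ (((PySem.Int.toChars n).length : Int) - st.1).toNat)) (1, 0)).2
      = (PySem.Int.toChars n).foldl (fun acc c => acc * 6 + pvDigit c) 0 := by
  rw [PySem.List.foldl_pyRange_zero_pyGetD' (PySem.Int.toChars n) ' '
      (fun (st : Int × Int) c =>
        (st.1 + 1, st.2 + pvDigit c * 6 ^ (((PySem.Int.toChars n).length : Int) - st.1).toNat)) (1, 0)]
  rw [pvPowfold ((PySem.Int.toChars n).length : Int) (PySem.Int.toChars n) 1 0 (by ring)]
  simp

-- ===== VERDICT (by name: the statement is the Claim_ definition above) =====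
theorem ndom_multiply_spec : Claim_equal_ndom_multiply := by
  intro a b _ _
  show ndom_multiply a b = ndom_multiply_alt a b
  unfold ndom_multiply ndom_multiply_alt
  simp only []
  rw [pvOperand a, pvOperand b]
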